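-- pv_equiv track=rewrite | github.com/Pedrodconde/Proyecto_final_PGAA | PYTHON/app.py | avion_idoneo
-- ===== SOURCE A (Python) =====
-- aviones = {
--     'A350': {'MTOW': 187000, 'OEW': 125000, 'MPL': 24000, 'MFW': 47000, 'R_MAX': 16100},
--     'A330': {'MTOW': 175000, 'OEW': 120500, 'MPL': 20400, 'MFW': 45000, 'R_MAX': 13400},
--     'A319': {'MTOW': 64300, 'OEW': 41500, 'MPL': 13400, 'MFW': 17000, 'R_MAX': 4200},
--     'A321': {'MTOW': 77000, 'OEW': 50500, 'MPL': 14800, 'MFW': 20000, 'R_MAX': 3700},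
--     'A320': {'MTOW': 64000, 'OEW': 41600, 'MPL': 12000, 'MFW': 17300, 'R_MAX': 2400},
-- }
--
-- def avion_idoneo(distancia):
--     avion_idoneo = None
--     menor_diferencia = float('inf')
--     for avion, datos in aviones.items():
--         diferencia = abs(datos['R_MAX'] - distancia)
--         if diferencia < menor_diferencia and distancia <= datos['R_MAX']:
--             avion_idoneo = avion
--             menor_diferencia = diferencia
--     return avion_idoneo
-- ===== SOURCE B (Python) =====
-- aviones = {
--     'A350': {'MTOW': 187000, 'OEW': 125000, 'MPL': 24000, 'MFW': 47000, 'R_MAX': 16100},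
--     'A330': {'MTOW': 175000, 'OEW': 120500, 'MPL': 20400, 'MFW': 45000, 'R_MAX': 13400},
--     'A319': {'MTOW': 64300, 'OEW': 41500, 'MPL': 13400, 'MFW': 17000, 'R_MAX': 4200},
--     'A321': {'MTOW': 77000, 'OEW': 50500, 'MPL': 14800, 'MFW': 20000, 'R_MAX': 3700},
--     'A320': {'MTOW': 64000, 'OEW': 41600, 'MPL': 12000, 'MFW': 17300, 'R_MAX': 2400},
-- }
--
-- def avion_idoneo(distancia):
--     # sort by range ascending; the first aircraft that can reach `distancia`
--     # is the one with the smallest sufficient range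
--     for avion, datos in sorted(aviones.items(), key=lambda kv: kv[1]['R_MAX']):
--         if distancia <= datos['R_MAX']:
--             return avion
--     return None
-- ===== Notes on version B (the rewrite author's own statement) =====
-- stated objective: simpler
-- what changed: Replaced the running-minimum-of-|R_MAX-distancia| scan over the dict with a sort-by-R_MAX-ascending then return-first-aircraft-whose-range-suffices loop.
import Mathlib
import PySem

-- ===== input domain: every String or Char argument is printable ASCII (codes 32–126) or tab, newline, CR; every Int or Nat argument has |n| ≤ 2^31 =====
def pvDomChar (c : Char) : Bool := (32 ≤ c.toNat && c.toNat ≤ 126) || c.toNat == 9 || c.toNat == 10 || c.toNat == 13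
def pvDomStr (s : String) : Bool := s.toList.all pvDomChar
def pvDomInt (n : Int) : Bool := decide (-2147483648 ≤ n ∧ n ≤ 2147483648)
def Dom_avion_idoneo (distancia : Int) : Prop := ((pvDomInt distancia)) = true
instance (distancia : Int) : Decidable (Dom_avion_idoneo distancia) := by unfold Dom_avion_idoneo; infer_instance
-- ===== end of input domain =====

-- B replaces A's running-minimum-of-|R_MAX-d| scan by sort-ascending-then-first-match (simpler).

-- the module-level dict, reduced to the only field the function reads (name, R_MAX), insertion order
def avionesRmax : List (String × Int) :=
  [("A350", 16100), ("A330", 13400), ("A319", 4200), ("A321", 3700), ("A320", 2400)]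

-- ===== PORT A =====
-- A's running minimum starts at float('inf'); `none` in the second state component
-- plays the role of +inf exactly (`diferencia < inf` is always true), so the
-- `none` branch tests only `distancia <= R_MAX`.
def avion_idoneo (distancia : Int) : Option String :=
  (avionesRmax.foldl
    (fun st kv =>
      let diferencia := |kv.2 - distancia|
      if st.2.elim true (fun m => decide (diferencia < m)) && decide (distancia ≤ kv.2)
      then (some kv.1, some diferencia) else st)
    ((none, none) : Option String × Option Int)).1

-- ===== PORT B =====
def avion_idoneo_first (distancia : Int) : List (String × Int) → Option String
  | [] => none
  | kv :: rest => if distancia ≤ kv.2 then some kv.1 else avion_idoneo_first distancia rest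

def avion_idoneo_alt (distancia : Int) : Option String :=
  avion_idoneo_first distancia (PySem.List.sorted avionesRmax (fun kv => kv.2) false)

-- ===== PRECONDITION & SPEC =====
def Spec_avion_idoneo (distancia : Int) (out : Option String) : Prop := out = avion_idoneo_alt distancia
instance (distancia : Int) (out : Option String) : Decidable (Spec_avion_idoneo distancia out) := by unfold Spec_avion_idoneo; infer_instance

-- ===== CLAIM (what is proved, stated in full; the proofs are below) =====
def Claim_equal_avion_idoneo : Prop := ∀ (distancia : Int), Dom_avion_idoneo distancia → Spec_avion_idoneo distancia (avion_idoneo distancia)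

-- ===== LEMMAS AND PROOFS =====
theorem avionesRmax_sorted :
    PySem.List.sorted avionesRmax (fun kv => kv.2) false =
      [("A320", 2400), ("A321", 3700), ("A319", 4200), ("A330", 13400), ("A350", 16100)] := by
  decide

-- ===== VERDICT (by name: the statement is the Claim_ definition above) =====
set_option maxHeartbeats 2000000 in
theorem avion_idoneo_spec : Claim_equal_avion_idoneo := by
  intro d _
  unfold Spec_avion_idoneo avion_idoneo avion_idoneo_alt
  rw [avionesRmax_sorted]
  simp only [avionesRmax, List.foldl, avion_idoneo_first, Option.elim_none, Option.elim_some, Bool.and_eq_true, decide_eq_true_eq]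
  split_ifs <;> (try simp only [Option.elim_none, Option.elim_some, Bool.and_eq_true, decide_eq_true_eq]) <;>
    (try split_ifs) <;> (try simp only [Option.elim_none, Option.elim_some, Bool.and_eq_true, decide_eq_true_eq]) <;>
    (try split_ifs) <;> (try simp only [Option.elim_none, Option.elim_some, Bool.and_eq_true, decide_eq_true_eq]) <;>
    (try split_ifs) <;> (try simp only [Option.elim_none, Option.elim_some, Bool.and_eq_true, decide_eq_true_eq]) <;>
    (try split_ifs) <;> (try simp only [Option.elim_none, Option.elim_some, Bool.and_eq_true, decide_eq_true_eq]) <;>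
    first
      | rfl
      | (exfalso; simp [Int.abs_eq_natAbs, -Nat.cast_natAbs] at *; all_goals omega)
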